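-- pv_equiv track=rewrite | github.com/srobertson86/pinnacle_io | pinnacle_io/readers/pinnacle_file_reader.py | _ignore_child_object
-- ===== SOURCE A (Python) =====
-- from typing import Dict, List, Any, Optional
--
-- def _ignore_child_object(lines: List[str], current_index: int) -> int:
--     """
--     Step over all lines until the end of the child object is reached.
--
--     Args:
--         lines: List of lines to parse.
--         current_index: Current line index.
--
--     Returns:
--         Updated line index.
--     """
--     brace_counter = 1
--     while current_index < len(lines) - 1:
--         current_index += 1
--         next_line = lines[current_index].rstrip()
--         if next_line.endswith('{'):
--             brace_counter += 1
--         elif next_line.endswith("};"):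
--             brace_counter -= 1
--
--         if brace_counter == 0:
--             break
--
--     return current_index
-- ===== SOURCE B (Python) =====
-- from typing import List
--
--
-- def _ignore_child_object(lines: List[str], current_index: int) -> int:
--     """Skip to the end of the child object by recursing on each nested child."""
--     i = current_index
--     while i < len(lines) - 1:
--         i += 1
--         line = lines[i].rstrip()
--         if line.endswith('{'):
--             i = _ignore_child_object(lines, i)
--         elif line.endswith('};'):
--             return i
--     return i
-- ===== Notes on version B (the rewrite author's own statement) =====
-- stated objective: alternative
-- what changed: Replaces A's flat brace-depth counter loop by recursion over the nested brace structure: each '...{' line triggers a recursive call that skips the whole child, and a '...};' line returns immediately (the implicit one level replaces the counter); Pre_ only excludes inputs where A raises IndexError (current_index <= -len(lines)-2), where B raises too.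
import Mathlib
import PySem

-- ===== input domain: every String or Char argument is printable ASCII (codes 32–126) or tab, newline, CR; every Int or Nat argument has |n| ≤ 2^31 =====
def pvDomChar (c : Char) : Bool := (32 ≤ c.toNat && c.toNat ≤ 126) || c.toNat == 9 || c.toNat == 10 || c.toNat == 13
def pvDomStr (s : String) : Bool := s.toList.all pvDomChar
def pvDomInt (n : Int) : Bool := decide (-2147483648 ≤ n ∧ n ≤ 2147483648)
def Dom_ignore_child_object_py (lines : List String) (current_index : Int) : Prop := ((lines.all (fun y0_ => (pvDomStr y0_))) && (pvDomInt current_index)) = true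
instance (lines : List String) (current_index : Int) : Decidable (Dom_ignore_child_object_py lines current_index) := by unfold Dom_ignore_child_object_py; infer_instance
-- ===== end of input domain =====

-- B replaces A's flat brace counter by recursion on the nested brace structure (objective: alternative decomposition, same cost).

-- ===== PORT A =====
-- A's while-loop with the running brace counter, as well-founded recursion on the distance to len-1.
def igcoLoopA (lines : List String) (ci : Int) (bc : Int) : Int :=
  if _h : ci < (lines.length : Int) - 1 then
    let ci' := ci + 1
    match PySem.List.pyGet? lines ci' with
    | none => ci'  -- Python raises IndexError here; excluded by Pre_
    | some s =>
      let next_line := PySem.Str.rstrip s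
      let bc' := if PySem.Str.endswith next_line "{" then bc + 1
                 else if PySem.Str.endswith next_line "};" then bc - 1
                 else bc
      if bc' = 0 then ci' else igcoLoopA lines ci' bc'
  else ci
termination_by ((lines.length : Int) - 1 - ci).toNat
decreasing_by omega

def ignore_child_object_py (lines : List String) (current_index : Int) : Int :=
  igcoLoopA lines current_index 1

-- ===== PORT B =====
-- B's loop: recurse into each child on '…{', return at '…};'.  Fuel only makes the
-- nested recursion structural; (len-1-i).toNat fuel always suffices (proved below).
def igcoLoopB (lines : List String) : Nat → Int → Int
  | 0, i => i
  | n+1, i =>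
    if i < (lines.length : Int) - 1 then
      let i' := i + 1
      match PySem.List.pyGet? lines i' with
      | none => i'  -- Python raises IndexError here; excluded by Pre_
      | some s =>
        let line := PySem.Str.rstrip s
        if PySem.Str.endswith line "{" then
          igcoLoopB lines n (igcoLoopB lines n i')
        else if PySem.Str.endswith line "};" then i'
        else igcoLoopB lines n i'
    else i

def ignore_child_object_py_alt (lines : List String) (current_index : Int) : Int :=
  igcoLoopB lines (((lines.length : Int) - 1 - current_index).toNat) current_index

-- ===== PRECONDITION & SPEC =====
-- Pre_ excludes exactly the inputs where A raises IndexError: current_index ≤ -len(lines)-2,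
-- where the first read lines[current_index+1] is below the negative-wraparound range.
def Pre_ignore_child_object_py (lines : List String) (current_index : Int) : Prop :=
  -(lines.length : Int) - 1 ≤ current_index
instance (lines : List String) (current_index : Int) : Decidable (Pre_ignore_child_object_py lines current_index) := by unfold Pre_ignore_child_object_py; infer_instance

def pvWitness_ignore_child_object_py : List String × Int := (["Trial = {", "  Name = x;", "};", "extra"], 0)

def Spec_ignore_child_object_py (lines : List String) (current_index : Int) (out : Int) : Prop := out = ignore_child_object_py_alt lines current_index
instance (lines : List String) (current_index : Int) (out : Int) : Decidable (Spec_ignore_child_object_py lines current_index out) := by unfold Spec_ignore_child_object_py; infer_instance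

-- ===== CLAIM (what is proved, stated in full; the proofs are below) =====
def Claim_equal_ignore_child_object_py : Prop := ∀ (lines : List String) (current_index : Int), Dom_ignore_child_object_py lines current_index → Pre_ignore_child_object_py lines current_index → Spec_ignore_child_object_py lines current_index (ignore_child_object_py lines current_index)

-- ===== LEMMAS AND PROOFS =====

-- A's loop never moves the index backwards.
lemma igcoLoopA_ge (lines : List String) (ci bc : Int) : ci ≤ igcoLoopA lines ci bc := by
  fun_induction igcoLoopA lines ci bc <;> omega

-- Inside the index range the read succeeds.
lemma pyGet?_isSome_of_range (lines : List String) (i : Int)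
    (h1 : -(lines.length : Int) ≤ i) (h2 : i < (lines.length : Int)) :
    ∃ s, PySem.List.pyGet? lines i = some s := by
  cases hg : PySem.List.pyGet? lines i with
  | some s => exact ⟨s, rfl⟩
  | none =>
    rw [PySem.List.pyGet?_eq_none_iff] at hg
    exact absurd ⟨h1, h2⟩ hg

-- Counter decomposition: running A's loop with counter bc+1 is skipping one child
-- (counter 1) and then running it with counter bc.
lemma igcoLoopA_split (lines : List String) :
    ∀ (n : Nat) (ci bc : Int), (((lines.length : Int) - 1 - ci).toNat ≤ n) → 1 ≤ bc →
      -(lines.length : Int) - 1 ≤ ci →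
      igcoLoopA lines ci (bc + 1) = igcoLoopA lines (igcoLoopA lines ci 1) bc := by
  intro n
  induction n with
  | zero =>
    intro ci bc hn _ _
    have hge : ¬ ci < (lines.length : Int) - 1 := by omega
    have hstop : ∀ b : Int, igcoLoopA lines ci b = ci := fun b => by
      rw [igcoLoopA, dif_neg hge]
    rw [hstop, hstop, hstop]
  | succ n ih =>
    intro ci bc hn hbc hlo
    by_cases hlt : ci < (lines.length : Int) - 1
    · obtain ⟨s, hs⟩ := pyGet?_isSome_of_range lines (ci + 1) (by omega) (by omega)
      have hski : ci + 1 ≤ igcoLoopA lines (ci + 1) 1 := igcoLoopA_ge lines (ci + 1) 1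
      by_cases hob : PySem.Str.endswith (PySem.Str.rstrip s) "{" = true
      · have hL : igcoLoopA lines ci (bc + 1) = igcoLoopA lines (ci + 1) (bc + 1 + 1) := by
          rw [igcoLoopA, dif_pos hlt]
          simp only [hs]
          rw [if_pos hob, if_neg (by omega : ¬ (bc + 1 + 1 : Int) = 0)]
        have hR : igcoLoopA lines ci 1 = igcoLoopA lines (ci + 1) (1 + 1) := by
          rw [igcoLoopA, dif_pos hlt]
          simp only [hs]
          rw [if_pos hob, if_neg (by omega : ¬ ((1 : Int) + 1 = 0))]
        rw [hL, hR, ih (ci + 1) (bc + 1) (by omega) (by omega) (by omega),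
          ih (igcoLoopA lines (ci + 1) 1) bc (by omega) hbc (by omega),
          ih (ci + 1) 1 (by omega) le_rfl (by omega)]
      · by_cases hcb : PySem.Str.endswith (PySem.Str.rstrip s) "};" = true
        · have hL : igcoLoopA lines ci (bc + 1) = igcoLoopA lines (ci + 1) (bc + 1 - 1) := by
            rw [igcoLoopA, dif_pos hlt]
            simp only [hs]
            rw [if_neg hob, if_pos hcb, if_neg (by omega : ¬ (bc + 1 - 1 : Int) = 0)]
          have hR : igcoLoopA lines ci 1 = ci + 1 := by
            rw [igcoLoopA, dif_pos hlt]
            simp only [hs]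
            rw [if_neg hob, if_pos hcb, if_pos (by omega : ((1 : Int) - 1 = 0))]
          rw [hL, hR]
          congr 1
          omega
        · have hL : igcoLoopA lines ci (bc + 1) = igcoLoopA lines (ci + 1) (bc + 1) := by
            rw [igcoLoopA, dif_pos hlt]
            simp only [hs]
            rw [if_neg hob, if_neg hcb, if_neg (by omega : ¬ (bc + 1 : Int) = 0)]
          have hR : igcoLoopA lines ci 1 = igcoLoopA lines (ci + 1) 1 := by
            rw [igcoLoopA, dif_pos hlt]
            simp only [hs]
            rw [if_neg hob, if_neg hcb, if_neg (by omega : ¬ ((1 : Int) = 0))]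
          rw [hL, hR]
          exact ih (ci + 1) bc (by omega) hbc (by omega)
    · have hstop : ∀ b : Int, igcoLoopA lines ci b = ci := fun b => by
        rw [igcoLoopA, dif_neg hlt]
      rw [hstop, hstop, hstop]

-- With fuel at least the remaining distance, B's recursion computes A's counter loop.
lemma igcoLoopB_eq (lines : List String) :
    ∀ (n : Nat) (ci : Int), (((lines.length : Int) - 1 - ci).toNat ≤ n) →
      -(lines.length : Int) - 1 ≤ ci →
      igcoLoopB lines n ci = igcoLoopA lines ci 1 := by
  intro n
  induction n with
  | zero =>
    intro ci hn _
    have hge : ¬ ci < (lines.length : Int) - 1 := by omega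
    rw [igcoLoopA, dif_neg hge]
    rfl
  | succ n ih =>
    intro ci hn hlo
    by_cases hlt : ci < (lines.length : Int) - 1
    · obtain ⟨s, hs⟩ := pyGet?_isSome_of_range lines (ci + 1) (by omega) (by omega)
      have hski : ci + 1 ≤ igcoLoopA lines (ci + 1) 1 := igcoLoopA_ge lines (ci + 1) 1
      rw [igcoLoopB, if_pos hlt]
      simp only [hs]
      by_cases hob : PySem.Str.endswith (PySem.Str.rstrip s) "{" = true
      · have hR : igcoLoopA lines ci 1 = igcoLoopA lines (ci + 1) (1 + 1) := by
          rw [igcoLoopA, dif_pos hlt]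
          simp only [hs]
          rw [if_pos hob, if_neg (by omega : ¬ ((1 : Int) + 1 = 0))]
        rw [if_pos hob, hR,
          igcoLoopA_split lines n (ci + 1) 1 (by omega) le_rfl (by omega),
          ih (ci + 1) (by omega) (by omega),
          ih (igcoLoopA lines (ci + 1) 1) (by omega) (by omega)]
      · by_cases hcb : PySem.Str.endswith (PySem.Str.rstrip s) "};" = true
        · have hR : igcoLoopA lines ci 1 = ci + 1 := by
            rw [igcoLoopA, dif_pos hlt]
            simp only [hs]
            rw [if_neg hob, if_pos hcb, if_pos (by omega : ((1 : Int) - 1 = 0))]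
          rw [if_neg hob, if_pos hcb, hR]
        · have hR : igcoLoopA lines ci 1 = igcoLoopA lines (ci + 1) 1 := by
            rw [igcoLoopA, dif_pos hlt]
            simp only [hs]
            rw [if_neg hob, if_neg hcb, if_neg (by omega : ¬ ((1 : Int) = 0))]
          rw [if_neg hob, if_neg hcb, hR]
          exact ih (ci + 1) (by omega) (by omega)
    · rw [igcoLoopB, if_neg hlt, igcoLoopA, dif_neg hlt]

-- ===== VERDICT (by name: the statement is the Claim_ definition above) =====
theorem ignore_child_object_py_spec : Claim_equal_ignore_child_object_py := by
  intro lines current_index _ hpre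
  unfold Spec_ignore_child_object_py ignore_child_object_py ignore_child_object_py_alt
  exact (igcoLoopB_eq lines _ current_index le_rfl hpre).symm
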